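-- pv_equiv track=rewrite | github.com/papibe/advent-of-code-2021 | day03/part2.py | count_ones_and_zeros
-- ===== SOURCE A (Python) =====
-- def count_ones_and_zeros(candidates):
--     one_counter = [0] * len(candidates[0])
--     zero_counter = [0] * len(candidates[0])
--
--     # cycle over the binary input
--     for bnumber in candidates:
--         # cycle over each bit of a binary string
--         for idx, bit in enumerate(bnumber):
--             if bit == '1':
--                 one_counter[idx] += 1
--             else:
--                 zero_counter[idx] += 1
--
--     return one_counter, zero_counter
-- ===== SOURCE B (Python) =====
-- def count_ones_and_zeros(candidates):
--     # Column-major: for each bit position, count '1's down the column;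
--     # zeros are the remaining rows (raises IndexError on ragged input).
--     width = len(candidates[0])
--     one_counter = [[row[j] for row in candidates].count('1') for j in range(width)]
--     zero_counter = [len(candidates) - ones for ones in one_counter]
--     return one_counter, zero_counter
-- ===== Notes on version B (the rewrite author's own statement) =====
-- stated objective: simpler
-- what changed: Row-major nested loop maintaining two preallocated counter arrays replaced by a column-major pass that counts '1's per bit position and derives zeros as rows minus ones; Pre_ excludes ragged input (and the empty list): A raises IndexError on a row longer than the first, and on a row shorter than the first A returns counts over incomplete columns while B raises IndexError there.
-- outside the precondition, e.g. on count_ones_and_zeros(['10', '1']): A returns ([2, 0], [0, 1]), B raises IndexError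
import Mathlib
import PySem

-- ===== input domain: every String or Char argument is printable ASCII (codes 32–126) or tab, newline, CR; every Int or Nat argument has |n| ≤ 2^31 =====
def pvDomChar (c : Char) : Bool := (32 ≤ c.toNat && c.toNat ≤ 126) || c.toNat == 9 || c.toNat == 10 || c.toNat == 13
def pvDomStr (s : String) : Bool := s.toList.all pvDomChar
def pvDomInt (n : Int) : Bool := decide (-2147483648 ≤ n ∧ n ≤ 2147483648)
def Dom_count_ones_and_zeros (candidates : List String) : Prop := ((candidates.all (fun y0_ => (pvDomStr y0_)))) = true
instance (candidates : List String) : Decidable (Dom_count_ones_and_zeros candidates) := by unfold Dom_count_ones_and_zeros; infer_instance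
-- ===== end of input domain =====

-- B replaces A's row-major nested loop over two preallocated counter arrays by a
-- column-major count of '1's per bit position with zeros derived arithmetically
-- (objective: simpler).


-- ===== PORT A =====
-- inner loop body: 'if bit == '1': one_counter[idx] += 1 else: zero_counter[idx] += 1'
def pvInnerStep (acc : List Int × List Int) (p : Int × Char) : List Int × List Int :=
  if p.2 = '1' then (PySem.List.pySetD acc.1 p.1 (PySem.List.pyGetD acc.1 p.1 0 + 1), acc.2)
  else (acc.1, PySem.List.pySetD acc.2 p.1 (PySem.List.pyGetD acc.2 p.1 0 + 1))

-- 'for idx, bit in enumerate(bnumber): …'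
def pvRowStep (acc : List Int × List Int) (bnumber : String) : List Int × List Int :=
  (PySem.List.enumerate bnumber.toList 0).foldl pvInnerStep acc

def count_ones_and_zeros (candidates : List String) : List Int × List Int :=
  match candidates with
  | [] => ([], [])   -- Python: len(candidates[0]) raises IndexError; outside Pre_
  | c0 :: _ =>
    let w := c0.toList.length          -- len(candidates[0])
    candidates.foldl pvRowStep (List.replicate w 0, List.replicate w 0)

-- ===== PORT B =====
-- '[row[j] for row in candidates]' ; row[j] raises IndexError on a too-short row
-- (outside Pre_), rendered here as a dropped none
def pvColumn (candidates : List String) (j : Nat) : List Char :=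
  candidates.filterMap (fun row => row.toList[j]?)

def count_ones_and_zeros_alt (candidates : List String) : List Int × List Int :=
  match candidates with
  | [] => ([], [])   -- len(candidates[0]) raises IndexError; outside Pre_
  | c0 :: _ =>
    let width := c0.toList.length
    let one_counter : List Int :=
      (List.range width).map (fun j => ((pvColumn candidates j).count '1' : Nat))
    (one_counter, one_counter.map (fun ones => (candidates.length : Int) - ones))

-- ===== PRECONDITION & SPEC =====
-- Pre_ excludes the empty list and ragged inputs: on a row longer than the first A
-- raises IndexError, and on inputs with a row shorter than the first A returns counts
-- over incomplete columns while B raises IndexError there.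
def Pre_count_ones_and_zeros (candidates : List String) : Prop :=
  candidates ≠ [] ∧ ∀ s ∈ candidates, s.toList.length = (candidates.headD "").toList.length
instance (candidates : List String) : Decidable (Pre_count_ones_and_zeros candidates) := by
  unfold Pre_count_ones_and_zeros; infer_instance
def pvWitness_count_ones_and_zeros : List String := ["10", "01", "11"]

def Spec_count_ones_and_zeros (candidates : List String) (out : List Int × List Int) : Prop := out = count_ones_and_zeros_alt candidates
instance (candidates : List String) (out : List Int × List Int) : Decidable (Spec_count_ones_and_zeros candidates out) := by unfold Spec_count_ones_and_zeros; infer_instance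

-- ===== CLAIM (what is proved, stated in full; the proofs are below) =====
def Claim_equal_count_ones_and_zeros : Prop := ∀ (candidates : List String), Dom_count_ones_and_zeros candidates → Pre_count_ones_and_zeros candidates → Spec_count_ones_and_zeros candidates (count_ones_and_zeros candidates)

-- ===== LEMMAS AND PROOFS =====

-- the column-j "ones" and "zeros" totals of a list of rows
def pvO (p : List String) (j : Nat) : Int := ((pvColumn p j).count '1' : Nat)
def pvZ (p : List String) (j : Nat) : Int := (((pvColumn p j).length : Nat) : Int) - pvO p j

-- contribution of one row (characters cs, enumeration start s) to column j
def pvInd1 (cs : List Char) (s j : Nat) : Int := if s ≤ j ∧ cs[j - s]? = some '1' then 1 else 0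
def pvInd0 (cs : List Char) (s j : Nat) : Int :=
  if s ≤ j ∧ j - s < cs.length ∧ cs[j - s]? ≠ some '1' then 1 else 0

theorem pvInd1_cons (c : Char) (rest : List Char) (s j : Nat) :
    pvInd1 (c :: rest) s j = (if j = s ∧ c = '1' then 1 else 0) + pvInd1 rest (s + 1) j := by
  unfold pvInd1
  by_cases h : j = s
  · subst h
    simp
  · by_cases h2 : s ≤ j
    · have h3 : j - s = (j - (s + 1)) + 1 := by omega
      have h4 : s + 1 ≤ j := by omega
      simp [h, h2, h3, h4]
    · have h4 : ¬ (s + 1 ≤ j) := by omega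
      simp [h, h2, h4]

theorem pvInd0_cons (c : Char) (rest : List Char) (s j : Nat) :
    pvInd0 (c :: rest) s j = (if j = s ∧ c ≠ '1' then 1 else 0) + pvInd0 rest (s + 1) j := by
  unfold pvInd0
  by_cases h : j = s
  · subst h
    simp
  · by_cases h2 : s ≤ j
    · have h3 : j - s = (j - (s + 1)) + 1 := by omega
      have h4 : s + 1 ≤ j := by omega
      simp [h, h2, h3, h4]
    · have h4 : ¬ (s + 1 ≤ j) := by omega
      simp [h, h2, h4]

theorem pv_set_map_range {w : Nat} (F : Nat → Int) (s : Nat) (v : Int) (hs : s < w) :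
    ((List.range w).map F).set s v = (List.range w).map (fun j => if j = s then v else F j) := by
  apply List.ext_getElem <;> simp
  intro i hi
  by_cases h : i = s
  · simp [List.getElem_set, h]
  · simp [List.getElem_set, h, Ne.symm h]

theorem pv_inner_eq (cs : List Char) : ∀ (s : Nat) (w : Nat) (F G : Nat → Int),
    s + cs.length ≤ w →
    (PySem.List.enumerate cs (s : Int)).foldl pvInnerStep ((List.range w).map F, (List.range w).map G) =
      ((List.range w).map (fun j => F j + pvInd1 cs s j),
       (List.range w).map (fun j => G j + pvInd0 cs s j)) := by
  induction cs with
  | nil =>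
    intro s w F G _
    simp [PySem.List.enumerate_nil, pvInd1, pvInd0]
  | cons c rest ih =>
    intro s w F G hw
    have hs : s < w := by simp at hw; omega
    rw [PySem.List.enumerate_cons]
    have hcast : (s : Int) + 1 = ((s + 1 : Nat) : Int) := by push_cast; ring
    by_cases hc : c = '1'
    · have hstep : pvInnerStep ((List.range w).map F, (List.range w).map G) ((s : Int), c) =
          ((List.range w).map (fun j => if j = s then F s + 1 else F j), (List.range w).map G) := by
        simp [pvInnerStep, hc, PySem.List.pyGetD_natCast, List.getElem?_range, hs,
          pv_set_map_range F s _ hs]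
      rw [List.foldl_cons, hstep, hcast, ih (s + 1) w _ _ (by simp at hw ⊢; omega)]
      simp only [Prod.mk.injEq]
      constructor <;> apply List.map_congr_left <;> intro j hj
      · rw [pvInd1_cons]
        by_cases h : j = s
        · subst h; simp [hc]; ring
        · simp [h]
      · rw [pvInd0_cons]
        simp [hc]
    · have hstep : pvInnerStep ((List.range w).map F, (List.range w).map G) ((s : Int), c) =
          ((List.range w).map F, (List.range w).map (fun j => if j = s then G s + 1 else G j)) := by
        simp [pvInnerStep, hc, PySem.List.pyGetD_natCast, List.getElem?_range, hs,
          pv_set_map_range G s _ hs]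
      rw [List.foldl_cons, hstep, hcast, ih (s + 1) w _ _ (by simp at hw ⊢; omega)]
      simp only [Prod.mk.injEq]
      constructor <;> apply List.map_congr_left <;> intro j hj
      · rw [pvInd1_cons]
        simp [hc]
      · rw [pvInd0_cons]
        by_cases h : j = s
        · subst h; simp [hc]; ring
        · simp [h]

theorem pv_column_append (p : List String) (r : String) (j : Nat) :
    pvColumn (p ++ [r]) j = pvColumn p j ++ (r.toList[j]?).toList := by
  cases h : r.toList[j]? <;>
    simp [pvColumn, List.filterMap_append, List.filterMap_cons, h]

theorem pv_O_append (p : List String) (r : String) (j : Nat) :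
    pvO (p ++ [r]) j = pvO p j + pvInd1 r.toList 0 j := by
  unfold pvO pvInd1
  rw [pv_column_append]
  cases h : r.toList[j]? with
  | none => simp [h]
  | some c =>
    by_cases hc : c = '1' <;> simp [h, hc, List.count_append] <;> push_cast <;> ring

theorem pv_Z_append (p : List String) (r : String) (j : Nat) :
    pvZ (p ++ [r]) j = pvZ p j + pvInd0 r.toList 0 j := by
  have hO := pv_O_append p r j
  unfold pvZ
  rw [pv_column_append, hO]
  unfold pvO pvInd1 pvInd0
  cases h : r.toList[j]? with
  | none =>
    have hlen : r.toList.length ≤ j := by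
      simpa using List.getElem?_eq_none_iff.mp h
    have h2 : ¬ (j < r.length) := by
      have : r.toList.length = r.length := by simp
      omega
    simp [h, h2]
  | some c =>
    obtain ⟨hlt, -⟩ := List.getElem?_eq_some_iff.mp h
    have hlt2 : j < r.length := by
      have : r.toList.length = r.length := by simp
      omega
    by_cases hc : c = '1' <;> simp [h, hc, hlt2, List.count_append] <;> ring

theorem pv_outer (w : Nat) : ∀ (rows p : List String),
    (∀ r ∈ rows, r.toList.length ≤ w) →
    rows.foldl pvRowStep ((List.range w).map (pvO p), (List.range w).map (pvZ p)) =
      ((List.range w).map (pvO (p ++ rows)), (List.range w).map (pvZ (p ++ rows))) := by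
  intro rows
  induction rows with
  | nil => intro p _; simp
  | cons r rest ih =>
    intro p hlen
    rw [List.foldl_cons]
    have hstep : pvRowStep ((List.range w).map (pvO p), (List.range w).map (pvZ p)) r =
        ((List.range w).map (pvO (p ++ [r])), (List.range w).map (pvZ (p ++ [r]))) := by
      unfold pvRowStep
      rw [show (0 : Int) = ((0 : Nat) : Int) by simp,
        pv_inner_eq r.toList 0 w _ _ (by simpa using hlen r (by simp))]
      simp only [Prod.mk.injEq]
      constructor <;> apply List.map_congr_left <;> intro j _
      · rw [pv_O_append]
      · rw [pv_Z_append]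
    rw [hstep, ih (p ++ [r]) (fun x hx => hlen x (by simp [hx]))]
    simp

theorem pv_column_len (p : List String) (w j : Nat) (hj : j < w)
    (hlen : ∀ s ∈ p, s.toList.length = w) :
    (pvColumn p j).length = p.length := by
  induction p with
  | nil => simp [pvColumn]
  | cons r rest ih =>
    have hr : r.toList.length = w := hlen r (by simp)
    have hjr : j < r.toList.length := by omega
    have h : r.toList[j]? = some (r.toList[j]) := List.getElem?_eq_getElem hjr
    have h2 := ih (fun s hs => hlen s (List.mem_cons_of_mem _ hs))
    simp only [pvColumn, List.filterMap_cons, h, List.length_cons] at h2 ⊢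
    omega

theorem pv_main (candidates : List String) (h : Pre_count_ones_and_zeros candidates) :
    count_ones_and_zeros candidates = count_ones_and_zeros_alt candidates := by
  obtain ⟨hne, hlen⟩ := h
  match candidates with
  | [] => exact absurd rfl hne
  | c0 :: cs =>
    have hlen' : ∀ s ∈ (c0 :: cs), s.toList.length = c0.toList.length := by
      simpa using hlen
    show (c0 :: cs).foldl pvRowStep
        (List.replicate c0.toList.length 0, List.replicate c0.toList.length 0) =
      ((List.range c0.toList.length).map
          (fun j => (((pvColumn (c0 :: cs) j).count '1' : Nat) : Int)),
        ((List.range c0.toList.length).map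
          (fun j => (((pvColumn (c0 :: cs) j).count '1' : Nat) : Int))).map
          (fun ones => ((c0 :: cs).length : Int) - ones))
    have hrepl : (List.replicate c0.toList.length (0 : Int)) =
        (List.range c0.toList.length).map (pvO []) := by
      symm
      rw [List.eq_replicate_iff]
      refine ⟨by simp, ?_⟩
      intro b hb
      simp at hb
      obtain ⟨j, -, rfl⟩ := hb
      simp [pvO, pvColumn]
    have hreplz : (List.replicate c0.toList.length (0 : Int)) =
        (List.range c0.toList.length).map (pvZ []) := by
      symm
      rw [List.eq_replicate_iff]
      refine ⟨by simp, ?_⟩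
      intro b hb
      simp at hb
      obtain ⟨j, -, rfl⟩ := hb
      simp [pvZ, pvO, pvColumn]
    nth_rewrite 2 [hreplz]
    rw [hrepl, pv_outer c0.toList.length (c0 :: cs) []
      (fun r hr => by rw [hlen' r hr])]
    simp only [List.nil_append, List.map_map, Prod.mk.injEq]
    refine ⟨by rfl, ?_⟩
    apply List.map_congr_left
    intro j hj
    simp only [List.mem_range] at hj
    simp only [Function.comp]
    rw [pvZ, pvO, pv_column_len (c0 :: cs) c0.toList.length j hj hlen']

-- ===== VERDICT (by name: the statement is the Claim_ definition above) =====
theorem count_ones_and_zeros_spec : Claim_equal_count_ones_and_zeros := by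
  intro candidates _ hpre
  unfold Spec_count_ones_and_zeros
  exact pv_main candidates hpre
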